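-- pv_equiv track=rewrite | github.com/PrinceSinghhub/GFG-Questions | Find Total Time Taken.py | totalTime
-- ===== SOURCE A (Python) =====
-- from typing import List
--
-- def totalTime(n: int, arr: List[int], time: List[int]) -> int:
--     # code here
--     myset = set()
--     ans = 0
--     for i in range(0, n):
--         if arr[i] in myset:
--             ans += time[arr[i] - 1]
--         else:
--             myset.add(arr[i])
--             ans += 1
--     return ans - 1
-- ===== SOURCE B (Python) =====
-- from typing import List
--
-- def totalTime(n: int, arr: List[int], time: List[int]) -> int:
--     # Count-first: build a frequency table of the first n elements, then
--     # aggregate: one unit per distinct value, plus (count-1)*time[v-1] per repeated value.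
--     counts = {}
--     for v in arr[:max(n, 0)]:
--         counts[v] = counts.get(v, 0) + 1
--     extra = 0
--     for v, c in counts.items():
--         if c > 1:
--             extra += (c - 1) * time[v - 1]
--     return len(counts) + extra - 1
-- ===== Notes on version B (the rewrite author's own statement) =====
-- stated objective: alternative
-- what changed: Replaces A's seen-set single pass (pay time[v-1] at each repeat occurrence) by a count-first frequency table over the first n elements followed by one aggregation pass over distinct values: len(counts) plus (count-1)*time[v-1] for each repeated value, minus 1.
import Mathlib
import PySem

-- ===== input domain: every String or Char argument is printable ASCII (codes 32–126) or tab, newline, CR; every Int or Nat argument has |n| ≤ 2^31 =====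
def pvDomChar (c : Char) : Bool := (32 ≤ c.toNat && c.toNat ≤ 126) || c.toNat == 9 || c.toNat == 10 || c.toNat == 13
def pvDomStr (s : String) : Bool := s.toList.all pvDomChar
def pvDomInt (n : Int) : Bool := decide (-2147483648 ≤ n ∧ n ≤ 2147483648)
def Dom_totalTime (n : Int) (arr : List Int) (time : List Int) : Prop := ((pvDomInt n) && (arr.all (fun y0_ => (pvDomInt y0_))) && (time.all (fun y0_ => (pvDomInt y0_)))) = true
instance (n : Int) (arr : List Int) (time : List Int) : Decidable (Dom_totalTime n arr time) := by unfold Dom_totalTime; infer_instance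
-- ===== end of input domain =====

-- B replaces A's seen-set single pass by a count-first frequency table and an
-- aggregation over distinct values (objective: alternative decomposition, same cost).

-- ===== PORT A =====
def totalTime (n : Int) (arr : List Int) (time : List Int) : Int :=
  -- myset = set(); ans = 0; for i in range(0, n): ...
  let st := (PySem.List.pyRange 0 n 1).foldl
    (fun (s : PySem.Set Int × Int) i =>
      let a := PySem.List.pyGetD arr i 0      -- arr[i]; in range under Pre_
      if a ∈ s.1 then (s.1, s.2 + PySem.List.pyGetD time (a - 1) 0)  -- time[arr[i]-1]; in range under Pre_
      else (PySem.Set.add s.1 a, s.2 + 1))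
    (PySem.Set.empty, 0)
  st.2 - 1

-- ===== PORT B =====
def totalTime_alt (n : Int) (arr : List Int) (time : List Int) : Int :=
  -- counts = {}; for v in arr[:max(n, 0)]: counts[v] = counts.get(v, 0) + 1
  let counts := (PySem.List.slice arr none (some (max n 0))).foldl
    (fun (d : PySem.Dict Int Int) v => d.insert v (d.getD v 0 + 1)) PySem.Dict.empty
  -- extra = 0; for v, c in counts.items(): if c > 1: extra += (c - 1) * time[v - 1]
  let extra := counts.items.foldl
    (fun (e : Int) p => if 1 < p.2 then e + (p.2 - 1) * PySem.List.pyGetD time (p.1 - 1) 0 else e) 0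
  (counts.size : Int) + extra - 1

-- ===== PRECONDITION & SPEC =====
-- Pre_ excludes exactly the inputs where Python A raises IndexError: n beyond arr's
-- length, or a repeated value v in the first n elements with time index v-1 out of range.
def Pre_totalTime (n : Int) (arr : List Int) (time : List Int) : Prop :=
  n ≤ (arr.length : Int) ∧
  ∀ v ∈ arr.take n.toNat, 1 < (arr.take n.toNat).count v → PySem.Raise.InRange time.length (v - 1)
instance (n : Int) (arr : List Int) (time : List Int) : Decidable (Pre_totalTime n arr time) := by
  unfold Pre_totalTime; infer_instance

def pvWitness_totalTime : Int × List Int × List Int := (2, [1, 1], [7])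

def Spec_totalTime (n : Int) (arr : List Int) (time : List Int) (out : Int) : Prop := out = totalTime_alt n arr time
instance (n : Int) (arr : List Int) (time : List Int) (out : Int) : Decidable (Spec_totalTime n arr time out) := by unfold Spec_totalTime; infer_instance

-- ===== CLAIM (what is proved, stated in full; the proofs are below) =====
def Claim_equal_totalTime : Prop := ∀ (n : Int) (arr : List Int) (time : List Int), Dom_totalTime n arr time → Pre_totalTime n arr time → Spec_totalTime n arr time (totalTime n arr time)

-- ===== LEMMAS AND PROOFS =====

-- A's loop state after processing the list l of values, started from the empty set:
-- the set is set(l), and ans is |set(l)| + Sum over set(l) of (count(k) - 1) * t(k).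
theorem totalTime_A_fold (time : List Int) (l : List Int) :
    l.foldl
      (fun (s : PySem.Set Int × Int) a =>
        if a ∈ s.1 then (s.1, s.2 + PySem.List.pyGetD time (a - 1) 0)
        else (PySem.Set.add s.1 a, s.2 + 1))
      (PySem.Set.empty, 0)
    = (PySem.Set.ofList l,
       ((PySem.Set.ofList l).length : Int) +
         ((PySem.Set.ofList l).map
           (fun k => ((l.count k : Int) - 1) * PySem.List.pyGetD time (k - 1) 0)).sum) := by
  induction l using List.reverseRecOn with
  | nil => simp [PySem.Set.ofList]
  | append_singleton l x ih =>
    rw [List.foldl_append, ih, PySem.Set.ofList_append_singleton]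
    by_cases hx : x ∈ PySem.Set.ofList l
    · have hxl : x ∈ l := (PySem.Set.mem_ofList l x).1 hx
      rw [PySem.Set.add_of_mem hx]
      simp only [List.foldl_cons, List.foldl_nil, if_pos hx]
      congr 1
      have hnd : (PySem.Set.ofList l).Nodup := PySem.Set.nodup_ofList l
      have hperm := List.perm_cons_erase hx
      have h1 := (hperm.map
        (fun k => (((l ++ [x]).count k : Int) - 1) * PySem.List.pyGetD time (k - 1) 0)).sum_eq
      have h2 := (hperm.map
        (fun k => ((l.count k : Int) - 1) * PySem.List.pyGetD time (k - 1) 0)).sum_eq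
      rw [h1, h2]
      simp only [List.map_cons, List.sum_cons]
      have hcx : (l ++ [x]).count x = l.count x + 1 := by simp
      have hcount1 : 1 ≤ l.count x := List.one_le_count_iff.2 hxl
      have hmaps : (((PySem.Set.ofList l).erase x).map
            (fun k => (((l ++ [x]).count k : Int) - 1) * PySem.List.pyGetD time (k - 1) 0))
          = (((PySem.Set.ofList l).erase x).map
            (fun k => ((l.count k : Int) - 1) * PySem.List.pyGetD time (k - 1) 0)) := by
        apply List.map_congr_left; intro k hk
        have hkx : k ≠ x := ((List.Nodup.mem_erase_iff hnd).1 hk).1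
        simp [List.count_append, Ne.symm hkx]
      rw [hmaps, hcx]
      push_cast
      ring
    · have hxl : x ∉ l := fun h => hx ((PySem.Set.mem_ofList l x).2 h)
      rw [PySem.Set.add_of_not_mem hx]
      simp only [List.foldl_cons, List.foldl_nil, if_neg hx]
      have hcx : (l ++ [x]).count x = 1 := by
        simp [List.count_append, List.count_eq_zero_of_not_mem hxl]
      have hmaps : ((PySem.Set.ofList l).map
            (fun k => (((l ++ [x]).count k : Int) - 1) * PySem.List.pyGetD time (k - 1) 0))
          = ((PySem.Set.ofList l).map
            (fun k => ((l.count k : Int) - 1) * PySem.List.pyGetD time (k - 1) 0)) := by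
        apply List.map_congr_left; intro k hk
        have hkx : k ≠ x := fun h => hxl ((PySem.Set.mem_ofList l x).1 (h ▸ hk))
        simp [List.count_append, Ne.symm hkx]
      simp only [List.map_append, List.sum_append, List.map_cons, List.map_nil, List.sum_cons,
        List.sum_nil, List.length_append, List.length_cons, List.length_nil, hmaps, hcx]
      rw [PySem.Set.add_of_not_mem hx]
      congr 1
      push_cast
      ring

-- B's aggregation over Counter(l).items equals the same sum (the c>1 guard only drops
-- terms that are 0 anyway, since every key of the counter has count >= 1).
theorem totalTime_B_extra (time : List Int) (l : List Int) :
    ((PySem.Dict.counter l).items.foldl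
      (fun (e : Int) p => if 1 < p.2 then e + (p.2 - 1) * PySem.List.pyGetD time (p.1 - 1) 0 else e) 0)
    = ((PySem.Set.ofList l).map
        (fun k => ((l.count k : Int) - 1) * PySem.List.pyGetD time (k - 1) 0)).sum := by
  rw [PySem.Dict.items_counter, List.foldl_map]
  have hcongr : (PySem.Set.ofList l).foldl
      (fun (e : Int) k =>
        if 1 < ((l.count k : Int)) then e + ((l.count k : Int) - 1) * PySem.List.pyGetD time (k - 1) 0 else e) 0
    = (PySem.Set.ofList l).foldl
      (fun (e : Int) k => e + ((l.count k : Int) - 1) * PySem.List.pyGetD time (k - 1) 0) 0 := by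
    apply PySem.List.foldl_congr_mem
    intro e k hk
    have hc : 1 ≤ l.count k := List.one_le_count_iff.2 ((PySem.Set.mem_ofList l k).1 hk)
    by_cases h1 : 1 < ((l.count k : Int))
    · rw [if_pos h1]
    · rw [if_neg h1]
      have h2 : (l.count k : Int) = 1 := by omega
      rw [h2]; ring
  exact hcongr.trans (by rw [PySem.List.foldl_add]; simp)

theorem totalTime_eq_core (n : Int) (arr time : List Int) (hlen : n ≤ (arr.length : Int)) :
    totalTime n arr time = totalTime_alt n arr time := by
  simp only [totalTime, totalTime_alt]
  have hslice : PySem.List.slice arr none (some (max n 0)) = arr.take n.toNat := by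
    rw [PySem.List.slice_to arr (le_max_right n 0)]
    have hmax : (max n 0).toNat = n.toNat := by omega
    rw [hmax]
  have hrange : PySem.List.pyRange 0 n 1 = PySem.List.pyRange 0 ((arr.take n.toNat).length : Int) 1 := by
    rcases le_or_gt 0 n with h0 | h0
    · congr 1
      simp only [List.length_take]
      omega
    · rw [PySem.List.pyRange_one_eq_nil (by omega),
        PySem.List.pyRange_one_eq_nil (by simp only [List.length_take]; omega)]
  have hget : ∀ (s : PySem.Set Int × Int), ∀ i ∈ PySem.List.pyRange 0 ((arr.take n.toNat).length : Int) 1,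
      (fun (s : PySem.Set Int × Int) i =>
        let a := PySem.List.pyGetD arr i 0
        if a ∈ s.1 then (s.1, s.2 + PySem.List.pyGetD time (a - 1) 0)
        else (PySem.Set.add s.1 a, s.2 + 1)) s i
      = (fun (s : PySem.Set Int × Int) i =>
        let a := PySem.List.pyGetD (arr.take n.toNat) i 0
        if a ∈ s.1 then (s.1, s.2 + PySem.List.pyGetD time (a - 1) 0)
        else (PySem.Set.add s.1 a, s.2 + 1)) s i := by
    intro s i hi
    have hi' := (PySem.List.mem_pyRange_one).1 hi
    have h0 : (0 : Int) ≤ i := hi'.1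
    have hlt : i < ((arr.take n.toNat).length : Int) := hi'.2
    have hlt' : i < (arr.length : Int) := by
      simp only [List.length_take] at hlt
      push_cast at hlt ⊢
      omega
    simp only [PySem.List.pyGetD_eq_getElem arr 0 h0 hlt',
      PySem.List.pyGetD_eq_getElem (arr.take n.toNat) 0 h0 hlt]
    rw [List.getElem_take]
  rw [hrange, PySem.List.foldl_congr_mem _ _ _ _ hget,
    PySem.List.foldl_pyRange_zero_pyGetD' (arr.take n.toNat) 0
      (fun (s : PySem.Set Int × Int) a =>
        if a ∈ s.1 then (s.1, s.2 + PySem.List.pyGetD time (a - 1) 0)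
        else (PySem.Set.add s.1 a, s.2 + 1)) (PySem.Set.empty, 0)]
  rw [totalTime_A_fold time (arr.take n.toNat)]
  rw [hslice, PySem.Dict.foldl_insert_getD_add_one_eq_counter, totalTime_B_extra]
  have hsize : ((PySem.Dict.counter (arr.take n.toNat)).size : Int)
      = ((PySem.Set.ofList (arr.take n.toNat)).length : Int) := by
    have hk := PySem.Dict.keys_counter (arr.take n.toNat)
    have : (PySem.Dict.counter (arr.take n.toNat)).keys.length
        = (PySem.Set.ofList (arr.take n.toNat)).length := by rw [hk]
    simp only [PySem.Dict.keys, List.length_map] at this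
    simp only [PySem.Dict.size, this]
  rw [hsize]

-- ===== VERDICT (by name: the statement is the Claim_ definition above) =====
theorem totalTime_spec : Claim_equal_totalTime := by
  intro n arr time _ hp
  unfold Spec_totalTime
  exact totalTime_eq_core n arr time hp.1
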